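-- pv_equiv track=rewrite | github.com/ManoMax/python-studies | TST/quantos_comeram/quantos_comeram.py | quantos_comeram
-- ===== SOURCE A (Python) =====
-- def quantos_comeram(N, fila):
-- 	soma = 0
-- 	for i in range(len(fila)):
-- 		if N >= fila[i]:
-- 			soma += fila[i]
-- 			N -= fila[i]
-- 		else: break
-- 	return soma
-- ===== SOURCE B (Python) =====
-- def quantos_comeram(N, fila):
--     # pass 1: cumulative sums of the queue
--     sums = []
--     total = 0
--     for x in fila:
--         total += x
--         sums.append(total)
--     # pass 2: last cumulative sum not exceeding N (0 if none)
--     last = 0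
--     for s in sums:
--         if s > N:
--             break
--         last = s
--     return last
-- ===== Notes on version B (the rewrite author's own statement) =====
-- stated objective: alternative
-- what changed: B replaces A's single greedy loop that mutates the remaining capacity with two passes: build the prefix-sum list, then return the last prefix sum not exceeding N.
import Mathlib
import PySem

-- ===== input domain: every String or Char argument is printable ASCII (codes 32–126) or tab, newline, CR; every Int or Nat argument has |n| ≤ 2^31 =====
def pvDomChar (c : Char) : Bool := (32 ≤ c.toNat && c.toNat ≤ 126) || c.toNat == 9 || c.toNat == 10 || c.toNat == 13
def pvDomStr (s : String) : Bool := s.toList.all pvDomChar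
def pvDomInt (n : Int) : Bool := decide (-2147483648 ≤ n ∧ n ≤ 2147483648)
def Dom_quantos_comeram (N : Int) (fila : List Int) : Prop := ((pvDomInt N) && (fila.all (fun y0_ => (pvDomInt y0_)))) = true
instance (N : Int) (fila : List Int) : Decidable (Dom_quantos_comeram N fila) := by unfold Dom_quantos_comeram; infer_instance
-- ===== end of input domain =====

-- B computes the prefix sums first and then picks the last one ≤ N, instead of A's greedy capacity-mutating loop (alternative decomposition, same cost).


-- ===== PORT A =====
-- Port of A: loop over the queue, eating while remaining capacity suffices.
def qcLoopA (fila : List Int) (n soma : Int) : Int :=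
  match fila with
  | [] => soma
  | x :: xs => if n ≥ x then qcLoopA xs (n - x) (soma + x) else soma

def quantos_comeram (N : Int) (fila : List Int) : Int :=
  qcLoopA fila N 0

-- ===== PORT B =====
-- Port of B: pass 1 builds the prefix sums, pass 2 keeps the last one ≤ N.
def qcSums (total : Int) (fila : List Int) : List Int :=
  match fila with
  | [] => []
  | x :: xs => (total + x) :: qcSums (total + x) xs

def qcLast (N : Int) (sums : List Int) (last : Int) : Int :=
  match sums with
  | [] => last
  | s :: ss => if s > N then last else qcLast N ss s

def quantos_comeram_alt (N : Int) (fila : List Int) : Int :=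
  qcLast N (qcSums 0 fila) 0

-- ===== PRECONDITION & SPEC =====
def Spec_quantos_comeram (N : Int) (fila : List Int) (out : Int) : Prop := out = quantos_comeram_alt N fila
instance (N : Int) (fila : List Int) (out : Int) : Decidable (Spec_quantos_comeram N fila out) := by unfold Spec_quantos_comeram; infer_instance

-- ===== CLAIM (what is proved, stated in full; the proofs are below) =====
def Claim_equal_quantos_comeram : Prop := ∀ (N : Int) (fila : List Int), Dom_quantos_comeram N fila → Spec_quantos_comeram N fila (quantos_comeram N fila)

-- ===== LEMMAS AND PROOFS =====

-- ===== VERDICT (by name: the statement is the Claim_ definition above) =====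
lemma qc_key (fila : List Int) : ∀ (N t : Int),
    qcLoopA fila (N - t) t = qcLast N (qcSums t fila) t := by
  induction fila with
  | nil => intro N t; rfl
  | cons x xs ih =>
    intro N t
    simp only [qcLoopA, qcSums, qcLast]
    by_cases h : N - t ≥ x
    · rw [if_pos h, if_neg (by omega)]
      have := ih N (t + x)
      rw [show N - (t + x) = N - t - x by ring] at this
      exact this
    · rw [if_neg h, if_pos (by omega)]

theorem quantos_comeram_spec : Claim_equal_quantos_comeram := by
  intro N fila _
  unfold Spec_quantos_comeram quantos_comeram quantos_comeram_alt
  have := qc_key fila N 0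
  simpa using this
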